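-- pv_equiv track=rewrite | github.com/alchrabas/terra-exeris | tests/test_sprites.py | _fill_set_with_coords_in_rectangular_area
-- ===== SOURCE A (Python) =====
-- def _fill_set_with_coords_in_rectangular_area(size, from_x, to_x, from_y, to_y):
--     a = set()
--     for x in range(0, size):
--         for y in range(0, size):
--             if from_x <= x <= to_x and \
--                     from_y <= y <= to_y:
--                 a.add((x, y))
--     return a
-- ===== SOURCE B (Python) =====
-- def _fill_set_with_coords_in_rectangular_area(size, from_x, to_x, from_y, to_y):
--     x_lo, x_hi = max(from_x, 0), min(to_x, size - 1)
--     y_lo, y_hi = max(from_y, 0), min(to_y, size - 1)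
--     return {(x, y) for x in range(x_lo, x_hi + 1) for y in range(y_lo, y_hi + 1)}
-- ===== Notes on version B (the rewrite author's own statement) =====
-- stated objective: faster
-- what changed: Instead of scanning the full size x size grid and testing each cell, B clamps the rectangle to the grid once and enumerates only the intersection ranges.
import Mathlib
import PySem

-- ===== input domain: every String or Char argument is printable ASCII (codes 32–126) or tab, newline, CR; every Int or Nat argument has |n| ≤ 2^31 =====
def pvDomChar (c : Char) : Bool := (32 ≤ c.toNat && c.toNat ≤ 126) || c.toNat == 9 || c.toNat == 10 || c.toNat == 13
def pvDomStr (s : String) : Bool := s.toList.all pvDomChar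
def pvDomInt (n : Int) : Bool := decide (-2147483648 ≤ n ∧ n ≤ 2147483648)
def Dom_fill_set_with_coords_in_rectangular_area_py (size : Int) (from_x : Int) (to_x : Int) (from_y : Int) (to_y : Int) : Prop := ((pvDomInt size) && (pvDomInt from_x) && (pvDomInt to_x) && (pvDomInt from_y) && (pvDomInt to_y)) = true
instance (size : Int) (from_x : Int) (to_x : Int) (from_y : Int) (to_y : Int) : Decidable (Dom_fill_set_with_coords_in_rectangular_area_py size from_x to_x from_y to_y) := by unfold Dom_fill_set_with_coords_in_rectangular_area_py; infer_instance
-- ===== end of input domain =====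

-- B clamps the rectangle to the grid once and enumerates only the intersection ranges
-- (O(area) instead of A's full O(size^2) grid scan); same set of coordinates.

-- ===== PORT A =====
def fill_set_with_coords_in_rectangular_area_py (size : Int) (from_x : Int) (to_x : Int) (from_y : Int) (to_y : Int) : List (Int × Int) :=
  (PySem.List.pyRange 0 size 1).foldl (fun a x =>
    (PySem.List.pyRange 0 size 1).foldl (fun a y =>
      if from_x ≤ x ∧ x ≤ to_x ∧ from_y ≤ y ∧ y ≤ to_y then PySem.Set.add a (x, y) else a) a)
    PySem.Set.empty

-- ===== PORT B =====
def fill_set_with_coords_in_rectangular_area_py_alt (size : Int) (from_x : Int) (to_x : Int) (from_y : Int) (to_y : Int) : List (Int × Int) :=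
  let x_lo := max from_x 0
  let x_hi := min to_x (size - 1)
  let y_lo := max from_y 0
  let y_hi := min to_y (size - 1)
  -- the set comprehension's elements are pairwise distinct by construction, so this
  -- list is exactly the set's distinct elements
  (PySem.List.pyRange x_lo (x_hi + 1) 1).flatMap (fun x =>
    (PySem.List.pyRange y_lo (y_hi + 1) 1).map (fun y => (x, y)))

-- ===== PRECONDITION & SPEC =====
def Spec_fill_set_with_coords_in_rectangular_area_py (size : Int) (from_x : Int) (to_x : Int) (from_y : Int) (to_y : Int) (out : List (Int × Int)) : Prop := out = fill_set_with_coords_in_rectangular_area_py_alt size from_x to_x from_y to_y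
instance (size : Int) (from_x : Int) (to_x : Int) (from_y : Int) (to_y : Int) (out : List (Int × Int)) : Decidable (Spec_fill_set_with_coords_in_rectangular_area_py size from_x to_x from_y to_y out) := by unfold Spec_fill_set_with_coords_in_rectangular_area_py; infer_instance

-- ===== CLAIM (what is proved, stated in full; the proofs are below) =====
def Claim_equal_fill_set_with_coords_in_rectangular_area_py : Prop := ∀ (size : Int) (from_x : Int) (to_x : Int) (from_y : Int) (to_y : Int), Dom_fill_set_with_coords_in_rectangular_area_py size from_x to_x from_y to_y → Spec_fill_set_with_coords_in_rectangular_area_py size from_x to_x from_y to_y (fill_set_with_coords_in_rectangular_area_py size from_x to_x from_y to_y)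

-- ===== LEMMAS AND PROOFS =====

-- Inner loop of A: starting from an accumulator containing no pair with first
-- component x, it appends (x, y) for exactly the y's passing the test, in order.
theorem pv_inner_char (from_x to_x from_y to_y x : Int) :
    ∀ (L : List Int) (a : List (Int × Int)), L.Nodup → (∀ y ∈ L, (x, y) ∉ a) →
      L.foldl (fun a y =>
          if from_x ≤ x ∧ x ≤ to_x ∧ from_y ≤ y ∧ y ≤ to_y then PySem.Set.add a (x, y) else a) a
        = a ++ (L.filter (fun y => decide (from_x ≤ x ∧ x ≤ to_x ∧ from_y ≤ y ∧ y ≤ to_y))).map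
            (fun y => (x, y)) := by
  intro L
  induction L with
  | nil => intro a _ _; simp
  | cons y L ih =>
    intro a hnd hfresh
    have hnd' := (List.nodup_cons.mp hnd).2
    have hy_not := (List.nodup_cons.mp hnd).1
    simp only [List.foldl_cons, List.filter_cons]
    by_cases hc : from_x ≤ x ∧ x ≤ to_x ∧ from_y ≤ y ∧ y ≤ to_y
    · have hadd : PySem.Set.add a (x, y) = a ++ [(x, y)] :=
        PySem.Set.add_of_not_mem (hfresh y (List.mem_cons_self))
      rw [if_pos hc, hadd, ih (a ++ [(x, y)]) hnd' ?_]
      · simp [hc]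
      · intro y' hy' hmem
        rcases List.mem_append.mp hmem with h | h
        · exact hfresh y' (List.mem_cons_of_mem _ hy') h
        · simp only [List.mem_singleton, Prod.mk.injEq] at h
          exact hy_not (h.2 ▸ hy')
    · rw [if_neg hc, ih a hnd' (fun y' hy' => hfresh y' (List.mem_cons_of_mem _ hy'))]
      simp [hc]

-- Outer loop of A: appends, for each x passing the x-test in order, the block of
-- (x, y) with y passing the y-test.
theorem pv_outer_char (from_x to_x from_y to_y : Int) (Ys : List Int) (hYs : Ys.Nodup) :
    ∀ (L : List Int) (a : List (Int × Int)), L.Nodup → (∀ p ∈ a, p.1 ∉ L) →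
      L.foldl (fun a x =>
          Ys.foldl (fun a y =>
            if from_x ≤ x ∧ x ≤ to_x ∧ from_y ≤ y ∧ y ≤ to_y then PySem.Set.add a (x, y) else a) a) a
        = a ++ (L.filter (fun x => decide (from_x ≤ x ∧ x ≤ to_x))).flatMap (fun x =>
            (Ys.filter (fun y => decide (from_y ≤ y ∧ y ≤ to_y))).map (fun y => (x, y))) := by
  intro L
  induction L with
  | nil => intro a _ _; simp
  | cons x L ih =>
    intro a hnd hfresh
    have hnd' := (List.nodup_cons.mp hnd).2
    have hx_not := (List.nodup_cons.mp hnd).1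
    simp only [List.foldl_cons, List.filter_cons]
    have hinner := pv_inner_char from_x to_x from_y to_y x Ys a hYs
      (fun y _ hmem => (hfresh (x, y) hmem) List.mem_cons_self)
    rw [hinner]
    have hfresh' : ∀ p ∈ a ++ (Ys.filter
        (fun y => decide (from_x ≤ x ∧ x ≤ to_x ∧ from_y ≤ y ∧ y ≤ to_y))).map
        (fun y => (x, y)), p.1 ∉ L := by
      intro p hp
      rcases List.mem_append.mp hp with h | h
      · exact fun hmem => hfresh p h (List.mem_cons_of_mem _ hmem)
      · rcases List.mem_map.mp h with ⟨y, _, rfl⟩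
        exact hx_not
    rw [ih _ hnd' hfresh']
    by_cases hx : from_x ≤ x ∧ x ≤ to_x
    · have hfc : Ys.filter (fun y => decide (from_x ≤ x ∧ x ≤ to_x ∧ from_y ≤ y ∧ y ≤ to_y))
          = Ys.filter (fun y => decide (from_y ≤ y ∧ y ≤ to_y)) := by
        apply List.filter_congr
        intro y _
        simp [hx.1, hx.2]
      rw [hfc]
      simp [hx, List.flatMap_cons]
    · have hfc : Ys.filter (fun y => decide (from_x ≤ x ∧ x ≤ to_x ∧ from_y ≤ y ∧ y ≤ to_y)) = [] := by
        apply List.filter_eq_nil_iff.mpr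
        intro y _
        simp only [decide_eq_true_eq]
        intro h
        exact hx ⟨h.1, h.2.1⟩
      rw [hfc]
      simp [hx]

-- Filtering an integer range by an interval test yields the clamped range.
theorem pv_filter_pyRange (lo hi : Int) :
    ∀ (n : Nat) (a b : Int), (b - a).toNat ≤ n →
      (PySem.List.pyRange a b 1).filter (fun v => decide (lo ≤ v ∧ v ≤ hi))
        = PySem.List.pyRange (max lo a) (min hi (b - 1) + 1) 1 := by
  intro n
  induction n with
  | zero =>
    intro a b h
    rw [PySem.List.pyRange_one_eq_nil (by omega), PySem.List.pyRange_one_eq_nil (by omega)]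
    rfl
  | succ n ih =>
    intro a b h
    by_cases hab : a < b
    · rw [PySem.List.pyRange_one_cons hab, List.filter_cons]
      by_cases hk : lo ≤ a ∧ a ≤ hi
      · have h1 : max lo a = a := by omega
        have h2 : max lo (a + 1) = a + 1 := by omega
        have h3 : a < min hi (b - 1) + 1 := by omega
        rw [h1, PySem.List.pyRange_one_cons h3]
        simp only [hk, and_self, decide_true, if_true]
        rw [ih (a + 1) b (by omega), h2]
      · simp only [decide_eq_true_eq, hk, if_false]
        rw [ih (a + 1) b (by omega)]
        by_cases hlo : a < lo
        · have : max lo (a + 1) = max lo a := by omega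
          rw [this]
        · have hhi : hi < a := by omega
          rw [PySem.List.pyRange_one_eq_nil (by omega), PySem.List.pyRange_one_eq_nil (by omega)]
    · rw [PySem.List.pyRange_one_eq_nil (by omega), PySem.List.pyRange_one_eq_nil (by omega)]
      rfl

-- ===== VERDICT (by name: the statement is the Claim_ definition above) =====
theorem fill_set_with_coords_in_rectangular_area_py_spec : Claim_equal_fill_set_with_coords_in_rectangular_area_py := by
  intro size from_x to_x from_y to_y _
  unfold Spec_fill_set_with_coords_in_rectangular_area_py
  unfold fill_set_with_coords_in_rectangular_area_py fill_set_with_coords_in_rectangular_area_py_alt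
  rw [pv_outer_char from_x to_x from_y to_y _ (PySem.List.nodup_pyRange_one 0 size)
      _ PySem.Set.empty (PySem.List.nodup_pyRange_one 0 size) (by intro p hp; cases hp)]
  rw [pv_filter_pyRange from_x to_x (size - 0).toNat 0 size (le_refl _),
      pv_filter_pyRange from_y to_y (size - 0).toNat 0 size (le_refl _)]
  show _ = _
  simp only [PySem.Set.empty, List.nil_append]
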